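-- pv_equiv track=rewrite | github.com/Bohemfree/excel | test.py | solution
-- ===== SOURCE A (Python) =====
-- from collections import defaultdict
--
-- survey = ["AN", "CF", "MJ", "RT", "NA"]
--
-- choices = [5, 3, 2, 7, 5]
--
-- def solution(survey, choices):
--     indicator = [('R', 'T'), ('C', 'F'), ('J', 'M'), ('A', 'N')]
--     answer = ''
--     personality = defaultdict(int)
--     for s, c in zip(survey, choices):
--         if c < 4:
--             personality[s[0]] += (4 - c)
--         elif c > 4:
--             personality[s[1]] += (c - 4)
--     for i in indicator:
--         if personality[i[0]] >= personality[i[1]]: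
--             answer += i[0]
--         else:
--             answer += i[1]
--     return answer
-- ===== SOURCE B (Python) =====
-- def solution(survey, choices):
--     # Side-effect-free staged computation: recompute each letter's score
--     # independently as two filtered comprehension sums, no shared counter.
--     def score(L):
--         return sum(4 - c for s, c in zip(survey, choices) if c < 4 and s[0] == L) \
--              + sum(c - 4 for s, c in zip(survey, choices) if c > 4 and s[1] == L)
--     return ''.join(a if score(a) >= score(b) else b for a, b in ("RT", "CF", "JM", "AN"))
-- ===== Notes on version B (the rewrite author's own statement) =====
-- stated objective: alternative
-- what changed: Replaces A's single mutating pass over a shared defaultdict counter with a side-effect-free staged computation: each indicator letter's score is recomputed independently as two filtered comprehension sums over the whole input, and each answer letter is picked by comparing its pair's two scores; no counter state crosses iterations. Pre_ excludes only inputs where both programs raise IndexError (a survey string too short for the needed index).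
import Mathlib
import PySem

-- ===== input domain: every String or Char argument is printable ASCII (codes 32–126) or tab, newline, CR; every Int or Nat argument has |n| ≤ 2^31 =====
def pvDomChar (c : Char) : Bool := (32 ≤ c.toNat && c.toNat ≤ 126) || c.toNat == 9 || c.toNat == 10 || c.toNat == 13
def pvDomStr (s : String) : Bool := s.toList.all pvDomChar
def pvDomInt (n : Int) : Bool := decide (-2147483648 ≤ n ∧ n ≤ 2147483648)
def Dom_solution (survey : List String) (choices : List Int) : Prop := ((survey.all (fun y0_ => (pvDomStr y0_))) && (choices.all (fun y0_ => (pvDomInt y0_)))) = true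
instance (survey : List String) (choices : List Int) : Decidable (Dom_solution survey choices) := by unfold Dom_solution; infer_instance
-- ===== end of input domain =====

-- B replaces A's single mutating pass over a shared defaultdict counter with a side-effect-free
-- staged computation: each letter's score is an independent filtered sum over the input (alternative, same cost).

-- ===== PORT A =====
-- the defaultdict(int) loop: personality[s[0]] += (4-c) / personality[s[1]] += (c-4);
-- s[0]/s[1] raise IndexError on a too-short string → none here
def solutionLoop (l : List (String × Int)) (d : PySem.Dict Char Int) : Option (PySem.Dict Char Int) :=
  match l with
  | [] => some d
  | (s, c) :: rest =>
    if c < 4 then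
      match PySem.Str.pyGet? s 0 with
      | none => none
      | some ch => solutionLoop rest (d.modify ch 0 (· + (4 - c)))
    else if 4 < c then
      match PySem.Str.pyGet? s 1 with
      | none => none
      | some ch => solutionLoop rest (d.modify ch 0 (· + (c - 4)))
    else solutionLoop rest d

-- the answer loop over indicator; defaultdict lookup personality[x] reads 0 for a missing key (getD),
-- its key-inserting side effect does not affect the returned string
def solutionPick (d : PySem.Dict Char Int) : List Char :=
  [('R', 'T'), ('C', 'F'), ('J', 'M'), ('A', 'N')].foldl
    (fun ans i => ans ++ [if d.getD i.1 0 ≥ d.getD i.2 0 then i.1 else i.2]) []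

def solution (survey : List String) (choices : List Int) : String :=
  match solutionLoop (survey.zip choices) PySem.Dict.empty with
  | none => ""          -- unreachable under Pre_solution (Python raises IndexError here)
  | some d => String.ofList (solutionPick d)

-- ===== PORT B =====
-- sum(4 - c for s, c in zip(survey, choices) if c < 4 and s[0] == L)
def altScore1 (l : List (String × Int)) (L : Char) : Option Int :=
  match l with
  | [] => some 0
  | (s, c) :: rest =>
    if c < 4 then
      match PySem.Str.pyGet? s 0 with
      | none => none
      | some ch =>
        match altScore1 rest L with
        | none => none
        | some t => some ((if ch = L then 4 - c else 0) + t)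
    else altScore1 rest L

-- sum(c - 4 for s, c in zip(survey, choices) if c > 4 and s[1] == L)
def altScore2 (l : List (String × Int)) (L : Char) : Option Int :=
  match l with
  | [] => some 0
  | (s, c) :: rest =>
    if 4 < c then
      match PySem.Str.pyGet? s 1 with
      | none => none
      | some t' =>
        match altScore2 rest L with
        | none => none
        | some t => some ((if t' = L then c - 4 else 0) + t)
    else altScore2 rest L

-- a if score(a) >= score(b) else b, for one pair
def altPick (l : List (String × Int)) (a b : Char) : Option Char :=
  match altScore1 l a, altScore2 l a, altScore1 l b, altScore2 l b with
  | some a1, some a2, some b1, some b2 => some (if a1 + a2 ≥ b1 + b2 then a else b)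
  | _, _, _, _ => none

def solution_alt (survey : List String) (choices : List Int) : String :=
  match altPick (survey.zip choices) 'R' 'T', altPick (survey.zip choices) 'C' 'F',
        altPick (survey.zip choices) 'J' 'M', altPick (survey.zip choices) 'A' 'N' with
  | some x1, some x2, some x3, some x4 => String.ofList [x1, x2, x3, x4]
  | _, _, _, _ => ""    -- unreachable under Pre_solution (Python raises IndexError here)

-- ===== PRECONDITION & SPEC =====
-- Pre_ excludes exactly the inputs where Python's s[0]/s[1] raises IndexError (survey string shorter
-- than the index the choice requires); both A and B raise there.
def Pre_solution (survey : List String) (choices : List Int) : Prop :=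
  ∀ p ∈ survey.zip choices,
    (p.2 < 4 → 1 ≤ p.1.toList.length) ∧ (4 < p.2 → 2 ≤ p.1.toList.length)
instance (survey : List String) (choices : List Int) : Decidable (Pre_solution survey choices) := by
  unfold Pre_solution; infer_instance

def pvWitness_solution : List String × List Int := (["AN", "CF", "MJ", "RT", "NA"], [5, 3, 2, 7, 5])

def Spec_solution (survey : List String) (choices : List Int) (out : String) : Prop := out = solution_alt survey choices
instance (survey : List String) (choices : List Int) (out : String) : Decidable (Spec_solution survey choices out) := by unfold Spec_solution; infer_instance

-- ===== CLAIM (what is proved, stated in full; the proofs are below) =====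
def Claim_equal_solution : Prop := ∀ (survey : List String) (choices : List Int), Dom_solution survey choices → Pre_solution survey choices → Spec_solution survey choices (solution survey choices)

-- ===== LEMMAS AND PROOFS =====

-- under Pre_, the two staged sums both return, and A's counter holds exactly their total per letter
theorem loop_scores (l : List (String × Int))
    (hpre : ∀ p ∈ l, (p.2 < 4 → 1 ≤ p.1.toList.length) ∧ (4 < p.2 → 2 ≤ p.1.toList.length)) :
    ∀ (d : PySem.Dict Char Int),
    ∃ d', solutionLoop l d = some d' ∧
      ∀ L : Char, ∃ v1 v2, altScore1 l L = some v1 ∧ altScore2 l L = some v2 ∧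
        d'.getD L 0 = d.getD L 0 + v1 + v2 := by
  induction l with
  | nil =>
    intro d
    exact ⟨d, rfl, fun L => ⟨0, 0, rfl, rfl, by omega⟩⟩
  | cons p rest ih =>
    rcases p with ⟨s, cc⟩
    have hp := hpre (s, cc) (List.mem_cons_self ..)
    have hrest := fun q hq => hpre q (List.mem_cons_of_mem _ hq)
    intro d
    by_cases h1 : cc < 4
    · have hlen : 1 ≤ s.toList.length := hp.1 h1
      obtain ⟨ch, t, hst⟩ : ∃ ch t, s.toList = ch :: t := by
        cases hs : s.toList with
        | nil => rw [hs] at hlen; simp at hlen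
        | cons x xs => exact ⟨x, xs, rfl⟩
      have hget : PySem.Str.pyGet? s 0 = some ch := by
        have := PySem.Str.pyGet?_natCast s 0
        simp only [Nat.cast_zero] at this
        rw [this, hst]; rfl
      obtain ⟨d', hA, hsc⟩ := ih hrest (d.modify ch 0 (· + (4 - cc)))
      refine ⟨d', ?_, ?_⟩
      · simp only [solutionLoop, if_pos h1, hget]; exact hA
      · intro L
        obtain ⟨v1, v2, e1, e2, he⟩ := hsc L
        refine ⟨(if ch = L then 4 - cc else 0) + v1, v2, ?_, ?_, ?_⟩
        · simp only [altScore1, if_pos h1, hget, e1]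
        · simp only [altScore2, if_neg (by omega : ¬ 4 < cc)]; exact e2
        · rw [he, PySem.Dict.getD_modify]
          by_cases hL : L = ch
          · subst hL; simp; omega
          · rw [if_neg hL, if_neg (fun h => hL h.symm)]; omega
    · by_cases h2 : 4 < cc
      · have hlen : 2 ≤ s.toList.length := hp.2 h2
        obtain ⟨c0, ch, t, hst⟩ : ∃ c0 ch t, s.toList = c0 :: ch :: t := by
          cases hs : s.toList with
          | nil => rw [hs] at hlen; simp at hlen
          | cons x xs =>
            cases hxs : xs with
            | nil => rw [hs, hxs] at hlen; simp at hlen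
            | cons y ys => exact ⟨x, y, ys, rfl⟩
        have hget : PySem.Str.pyGet? s 1 = some ch := by
          have := PySem.Str.pyGet?_natCast s 1
          simp only [Nat.cast_one] at this
          rw [this, hst]; rfl
        obtain ⟨d', hA, hsc⟩ := ih hrest (d.modify ch 0 (· + (cc - 4)))
        refine ⟨d', ?_, ?_⟩
        · simp only [solutionLoop, if_neg h1, if_pos h2, hget]; exact hA
        · intro L
          obtain ⟨v1, v2, e1, e2, he⟩ := hsc L
          refine ⟨v1, (if ch = L then cc - 4 else 0) + v2, ?_, ?_, ?_⟩
          · simp only [altScore1, if_neg h1]; exact e1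
          · simp only [altScore2, if_pos h2, hget, e2]
          · rw [he, PySem.Dict.getD_modify]
            by_cases hL : L = ch
            · subst hL; simp; omega
            · rw [if_neg hL, if_neg (fun h => hL h.symm)]; omega
      · obtain ⟨d', hA, hsc⟩ := ih hrest d
        refine ⟨d', by simp only [solutionLoop, if_neg h1, if_neg h2]; exact hA, ?_⟩
        intro L
        obtain ⟨v1, v2, e1, e2, he⟩ := hsc L
        exact ⟨v1, v2, by simp only [altScore1, if_neg h1]; exact e1,
               by simp only [altScore2, if_neg h2]; exact e2, he⟩

-- ===== VERDICT (by name: the statement is the Claim_ definition above) =====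
theorem solution_spec : Claim_equal_solution := by
  intro survey choices _ hpre
  unfold Spec_solution solution solution_alt
  obtain ⟨d', hA, hsc⟩ := loop_scores (survey.zip choices) hpre PySem.Dict.empty
  obtain ⟨r1, r2, er1, er2, hr⟩ := hsc 'R'
  obtain ⟨t1, t2, et1, et2, ht⟩ := hsc 'T'
  obtain ⟨c1, c2, ec1, ec2, hc⟩ := hsc 'C'
  obtain ⟨f1, f2, ef1, ef2, hf⟩ := hsc 'F'
  obtain ⟨j1, j2, ej1, ej2, hj⟩ := hsc 'J'
  obtain ⟨m1, m2, em1, em2, hm⟩ := hsc 'M'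
  obtain ⟨a1, a2, ea1, ea2, ha⟩ := hsc 'A'
  obtain ⟨n1, n2, en1, en2, hn⟩ := hsc 'N'
  simp only [PySem.Dict.getD_empty] at hr ht hc hf hj hm ha hn
  rw [hA]
  simp only [altPick, er1, er2, et1, et2, ec1, ec2, ef1, ef2, ej1, ej2, em1, em2,
    ea1, ea2, en1, en2, solutionPick, List.foldl, List.nil_append]
  congr 1
  have e : ∀ (x y u v u' v' : Int) (p q : Char), x = 0 + u + v → y = 0 + u' + v' →
      (if x ≥ y then p else q) = (if u + v ≥ u' + v' then p else q) := by
    intro x y u v u' v' p q hx hy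
    by_cases h : x ≥ y
    · rw [if_pos h, if_pos (by omega)]
    · rw [if_neg h, if_neg (by omega)]
  rw [e _ _ _ _ _ _ _ _ hr ht, e _ _ _ _ _ _ _ _ hc hf, e _ _ _ _ _ _ _ _ hj hm,
      e _ _ _ _ _ _ _ _ ha hn]
  simp
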